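-- pv_equiv track=rewrite | github.com/VyacheslavZalygin/PyEducation2021 | Statgrad/22.py | f
-- ===== SOURCE A (Python) =====
-- def f(x):
--   a, b = 1, 0
--   while x > 0:
--     d = x%10
--     a *= d
--     if d > 5:
--       b += d
--     x //= 10
--   return a, b
-- ===== SOURCE B (Python) =====
-- def f(x):
--   if x <= 0:
--     return (1, 0)
--   ds = [int(ch) for ch in str(x)]
--   p = 1
--   for d in ds:
--     p *= d
--   return (p, sum(d for d in ds if d > 5))
-- ===== Notes on version B (the rewrite author's own statement) =====
-- stated objective: idiomatic
-- what changed: B materialises the digit list from str(x) once and then computes the two results in separate staged passes (a product fold and a sum over a filtered generator), instead of A's single fused while loop extracting digits with modulo/floor-division and updating both accumulators in place.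
import Mathlib
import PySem

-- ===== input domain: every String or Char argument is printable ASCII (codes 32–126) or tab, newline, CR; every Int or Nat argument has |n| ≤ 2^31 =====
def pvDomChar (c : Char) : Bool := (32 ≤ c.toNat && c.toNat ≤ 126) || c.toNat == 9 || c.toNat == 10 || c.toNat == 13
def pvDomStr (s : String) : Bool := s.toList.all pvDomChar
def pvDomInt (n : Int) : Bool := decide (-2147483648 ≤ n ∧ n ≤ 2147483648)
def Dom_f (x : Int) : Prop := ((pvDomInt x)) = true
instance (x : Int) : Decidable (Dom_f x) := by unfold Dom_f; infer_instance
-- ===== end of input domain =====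

-- B builds the digit list from str(x) once and computes product and big-digit sum in separate staged passes; same cost, more idiomatic.


-- ===== PORT A =====
-- the while loop of A, as structural recursion on the (nonnegative) value of x
def fLoop (x a b : Int) : Int × Int :=
  if h : 0 < x then
    fLoop (PySem.Int.floordiv x 10) (a * PySem.Int.mod x 10)
      (if PySem.Int.mod x 10 > 5 then b + PySem.Int.mod x 10 else b)
  else (a, b)
termination_by x.toNat
decreasing_by
  rw [PySem.Int.floordiv_eq_ediv_of_pos (by omega)]
  omega

def f (x : Int) : Int × Int := fLoop x 1 0

-- ===== PORT B =====
-- int(ch) is ported as toNat - 48, exact on the digit characters str(x) produces for x > 0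
def f_alt (x : Int) : Int × Int :=
  if x ≤ 0 then (1, 0)
  else
    let ds := (PySem.Int.toChars x).map (fun c => (c.toNat : Int) - 48)
    let p := ds.foldl (· * ·) 1
    (p, (ds.filter (fun d => decide (5 < d))).foldl (· + ·) 0)

-- ===== PRECONDITION & SPEC =====
def Spec_f (x : Int) (out : Int × Int) : Prop := out = f_alt x
instance (x : Int) (out : Int × Int) : Decidable (Spec_f x out) := by unfold Spec_f; infer_instance

-- ===== CLAIM (what is proved, stated in full; the proofs are below) =====
def Claim_equal_f : Prop := ∀ (x : Int), Dom_f x → Spec_f x (f x)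

-- ===== LEMMAS AND PROOFS =====

-- product of the decimal digits, and sum of the digits exceeding 5
def pvP (n : Nat) : Int := ((Nat.digits 10 n).map (fun d => Int.ofNat d)).prod
def pvS (n : Nat) : Int := ((Nat.digits 10 n).map (fun d => if 5 < d then Int.ofNat d else 0)).sum

theorem tdc_append (fu : Nat) : ∀ (n : Nat) (rest : List Char),
    Nat.toDigitsCore 10 fu n rest = Nat.toDigitsCore 10 fu n [] ++ rest := by
  induction fu with
  | zero => intro n rest; simp [Nat.toDigitsCore]
  | succ fu ih =>
    intro n rest
    by_cases h : n / 10 = 0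
    · simp [Nat.toDigitsCore, h]
    · simp only [Nat.toDigitsCore, h, if_false]
      rw [ih (n / 10) (Nat.digitChar (n % 10) :: rest),
          ih (n / 10) (Nat.digitChar (n % 10) :: [])]
      simp

theorem tdc_fuel : ∀ (n fu : Nat) (rest : List Char), n < fu →
    Nat.toDigitsCore 10 fu n rest = Nat.toDigitsCore 10 (n + 1) n rest := by
  intro n
  induction n using Nat.strong_induction_on with
  | _ n ih =>
    intro fu rest hfu
    obtain ⟨fu, rfl⟩ : ∃ fu', fu = fu' + 1 := ⟨fu - 1, by omega⟩
    by_cases h : n / 10 = 0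
    · simp [Nat.toDigitsCore, h]
    · have hn0 : 0 < n := by omega
      have hdiv : n / 10 < n := Nat.div_lt_self hn0 (by norm_num)
      simp only [Nat.toDigitsCore, h, if_false]
      rw [ih (n / 10) hdiv fu _ (by omega), ih (n / 10) hdiv n _ (by omega)]

theorem toDigits_step (n : Nat) (h : n / 10 ≠ 0) :
    Nat.toDigits 10 n = Nat.toDigits 10 (n / 10) ++ [Nat.digitChar (n % 10)] := by
  have hn0 : 0 < n := by omega
  have hdiv : n / 10 < n := Nat.div_lt_self hn0 (by norm_num)
  show Nat.toDigitsCore 10 (n + 1) n [] = _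
  simp only [Nat.toDigitsCore, h, if_false]
  rw [tdc_fuel (n / 10) n _ hdiv, tdc_append]
  rfl

theorem toDigits_small (n : Nat) (h : n < 10) :
    Nat.toDigits 10 n = [Nat.digitChar n] := by
  have h0 : n / 10 = 0 := Nat.div_eq_of_lt h
  show Nat.toDigitsCore 10 (n + 1) n [] = _
  simp [Nat.toDigitsCore, h0, Nat.mod_eq_of_lt h]

theorem dval_digitChar (d : Nat) (h : d < 10) :
    ((Nat.digitChar d).toNat : Int) - 48 = (d : Int) := by
  interval_cases d <;> rfl

-- A's loop computes (a * product of digits, b + sum of big digits)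
theorem fLoop_char : ∀ (n : Nat) (a b : Int),
    fLoop (n : Int) a b = (a * pvP n, b + pvS n) := by
  intro n
  induction n using Nat.strong_induction_on with
  | _ n ih =>
    intro a b
    by_cases hn : n = 0
    · subst hn
      rw [fLoop]
      simp [pvP, pvS]
    · have hn0 : 0 < n := by omega
      have hdiv : n / 10 < n := Nat.div_lt_self hn0 (by norm_num)
      have hfd : PySem.Int.floordiv (n : Int) 10 = ((n / 10 : Nat) : Int) := by
        exact_mod_cast PySem.Int.floordiv_natCast n 10
      have hmd : PySem.Int.mod (n : Int) 10 = ((n % 10 : Nat) : Int) := by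
        exact_mod_cast PySem.Int.mod_natCast n 10
      rw [fLoop]
      rw [dif_pos (by exact_mod_cast hn0), hfd, hmd, ih (n / 10) hdiv]
      have hdig : Nat.digits 10 n = n % 10 :: Nat.digits 10 (n / 10) :=
        Nat.digits_def' (by norm_num) hn0
      have hP : pvP n = ((n % 10 : Nat) : Int) * pvP (n / 10) := by
        unfold pvP; rw [hdig]; rfl
      have hS : pvS n = (if 5 < n % 10 then ((n % 10 : Nat) : Int) else 0) + pvS (n / 10) := by
        unfold pvS; rw [hdig]; rfl
      simp only [hP, hS, Prod.mk.injEq]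
      refine ⟨by ring, ?_⟩
      generalize pvS (n / 10) = s
      split_ifs with h1 h2 h2 <;> [ring; omega; omega; ring]

-- B's digit list is the reversed little-endian digit list, as integers
theorem charsMap : ∀ (n : Nat), 0 < n →
    (Nat.toDigits 10 n).map (fun c => (c.toNat : Int) - 48)
      = ((Nat.digits 10 n).map (fun d : Nat => (d : Int))).reverse := by
  intro n
  induction n using Nat.strong_induction_on with
  | _ n ih =>
    intro hn0
    have hdig : Nat.digits 10 n = n % 10 :: Nat.digits 10 (n / 10) :=
      Nat.digits_def' (by norm_num) hn0
    by_cases h : n / 10 = 0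
    · have h10 : n < 10 := by omega
      rw [toDigits_small n h10, hdig, h]
      simp [dval_digitChar n h10, Nat.mod_eq_of_lt h10]
    · have hdiv : n / 10 < n := Nat.div_lt_self hn0 (by norm_num)
      have hm : n % 10 < 10 := Nat.mod_lt n (by norm_num)
      rw [toDigits_step n h, List.map_append, ih (n / 10) hdiv (by omega), hdig]
      simp [dval_digitChar _ hm]

-- B's filtered-sum pass over the reversed digit list, related to pvS
theorem revFoldl (l : List Nat) : ∀ (s : Int),
    ((((l.map (fun d : Nat => (d : Int))).reverse).filter (fun d => decide (5 < d))).foldl (· + ·) s)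
      = s + (l.map (fun d => if 5 < d then Int.ofNat d else 0)).sum := by
  induction l with
  | nil => intro s; simp
  | cons d t ih =>
    intro s
    simp only [List.map_cons, List.reverse_cons, List.filter_append, List.foldl_append, ih]
    by_cases h : 5 < d
    · have h' : (5 : Int) < (d : Int) := by exact_mod_cast h
      simp [h, h', Int.ofNat_eq_natCast]
      ring
    · have h' : ¬ (5 : Int) < (d : Int) := by exact_mod_cast h
      simp [h, h']

-- B's product pass over the reversed digit list, related to pvP
theorem revFoldlMul (l : List Nat) : ∀ (s : Int),
    (((l.map (fun d : Nat => (d : Int))).reverse).foldl (· * ·) s)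
      = s * (l.map (fun d => Int.ofNat d)).prod := by
  induction l with
  | nil => intro s; simp
  | cons d t ih =>
    intro s
    simp [ih, Int.ofNat_eq_natCast]
    ring

-- ===== VERDICT (by name: the statement is the Claim_ definition above) =====
theorem f_spec : Claim_equal_f := by
  intro x _
  show f x = f_alt x
  by_cases hx : 0 < x
  · have hxe : x = ((x.toNat : Nat) : Int) := by omega
    have hn0 : 0 < x.toNat := by omega
    unfold f f_alt
    rw [if_neg (by omega)]
    have hneg : ¬ x < 0 := by omega
    have htc : PySem.Int.toChars x = Nat.toDigits 10 x.toNat := by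
      simp [PySem.Int.toChars, hneg]
    rw [htc, charsMap x.toNat hn0]
    simp only [revFoldlMul, revFoldl]
    conv_lhs => rw [hxe]
    rw [fLoop_char x.toNat 1 0]
    simp [pvP, pvS, Int.toNat_natCast]
  · unfold f f_alt
    rw [fLoop, dif_neg hx, if_pos (by omega)]
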